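-- pv_equiv track=rewrite | github.com/eric-ai-lab/OmniTrace | src/omnitrace/modalities/image_text.py | _get_qwen_image_text_spans
-- ===== SOURCE A (Python) =====
-- from typing import Any, Dict, List, Optional, Tuple
--
-- def _get_qwen_image_text_spans(
--     input_ids: List[int],
--     prompt_start: int,
-- ) -> Tuple[List[int], List[Tuple[str, Tuple[int, int]]], Dict[str, List[Tuple[int, int]]]]:
--     """
--     Recover source modality spans for Qwen image-text inputs.
--
--     Assumes image regions are delimited by:
--       <|vision_bos|> ... <|vision_eos|>
--
--     Returns:
--       trimmed_input_ids,
--       ordered token spans,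
--       modality spans dict
--     """
--     # Qwen image-text old logic used this slice.
--     start_idx = prompt_start
--     end_idx = len(input_ids) - 5
--     trimmed = input_ids[start_idx:end_idx]
--
--     # hardcoded Qwen vision bos/eos ids, consistent with old pipeline
--     VISION_BOS_TOKEN = 151652
--     VISION_EOS_TOKEN = 151653
--
--     token_spans: List[Tuple[str, Tuple[int, int]]] = []
--     modality_spans: Dict[str, List[Tuple[int, int]]] = {
--         "text": [],
--         "image": [],
--     }
--
--     image_spans: List[Tuple[int, int]] = []
--     curr_img_start = None
--
--     for i, tok in enumerate(trimmed):
--         if tok == VISION_BOS_TOKEN: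
--             curr_img_start = i
--         elif tok == VISION_EOS_TOKEN and curr_img_start is not None:
--             image_spans.append((curr_img_start, i))
--             curr_img_start = None
--
--     cur = 0
--     for img_start, img_end in image_spans:
--         if cur < img_start:
--             text_span = (cur, img_start - 1)
--             token_spans.append(("text", text_span))
--             modality_spans["text"].append(text_span)
--
--         img_span = (img_start, img_end)
--         token_spans.append(("image", img_span))
--         modality_spans["image"].append(img_span)
--         cur = img_end + 1
--
--     if cur < len(trimmed):
--         text_span = (cur, len(trimmed) - 1)
--         token_spans.append(("text", text_span))
--         modality_spans["text"].append(text_span)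
--
--     return trimmed, token_spans, modality_spans
-- ===== SOURCE B (Python) =====
-- def _get_qwen_image_text_spans(input_ids, prompt_start):
--     # Different algorithm: extract BOS/EOS position lists, pair them with a two-pointer
--     # sweep (last BOS before each EOS wins), then build the span lists declaratively
--     # from the matched image pairs (zip + comprehensions) instead of a stateful emit loop.
--     trimmed = input_ids[prompt_start: len(input_ids) - 5]
--     n = len(trimmed)
--     bos = [i for i, t in enumerate(trimmed) if t == 151652]
--     eos = [i for i, t in enumerate(trimmed) if t == 151653]
--
--     images = []
--     last_bos = None
--     bi = 0
--     for e in eos: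
--         while bi < len(bos) and bos[bi] < e:
--             last_bos = bos[bi]
--             bi += 1
--         if last_bos is not None:
--             images.append((last_bos, e))
--         last_bos = None
--
--     starts = [0] + [e + 1 for _, e in images]
--     tail_start = images[-1][1] + 1 if images else 0
--     token_spans = [p for s, (b, e) in zip(starts, images)
--                    for p in (([("text", (s, b - 1))] if s <= b - 1 else [])
--                              + [("image", (b, e))])]
--     token_spans += [("text", (tail_start, n - 1))] if tail_start <= n - 1 else []
--     return trimmed, token_spans, {
--         "text": [sp for lab, sp in token_spans if lab == "text"],
--         "image": images,
--     }
-- ===== Notes on version B (the rewrite author's own statement) =====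
-- stated objective: alternative
-- what changed: Replaces A's stateful token scan plus second emit loop with a different pipeline: extract BOS/EOS position lists, match them with a two-pointer pairing sweep, and then build token/text spans declaratively from the matched pairs via zip + comprehensions (the text list is a filter of the token spans).
import Mathlib
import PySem

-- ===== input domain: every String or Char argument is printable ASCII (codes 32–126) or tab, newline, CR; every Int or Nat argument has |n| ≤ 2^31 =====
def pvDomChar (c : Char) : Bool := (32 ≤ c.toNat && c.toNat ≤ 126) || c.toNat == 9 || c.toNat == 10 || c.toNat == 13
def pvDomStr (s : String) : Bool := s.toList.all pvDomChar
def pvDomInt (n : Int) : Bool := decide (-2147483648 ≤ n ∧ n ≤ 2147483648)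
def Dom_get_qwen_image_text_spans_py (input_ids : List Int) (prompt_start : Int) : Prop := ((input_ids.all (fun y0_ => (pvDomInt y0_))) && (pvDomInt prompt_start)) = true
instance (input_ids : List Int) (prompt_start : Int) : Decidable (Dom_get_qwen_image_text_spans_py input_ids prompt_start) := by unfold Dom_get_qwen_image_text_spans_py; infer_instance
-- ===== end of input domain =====

-- B replaces A's stateful scan+emit with BOS/EOS position lists, a two-pointer pairing
-- sweep, and a declarative zip/flatMap build of the span lists (objective: alternative).

-- ===== PORT A =====
-- A's first loop: collect image_spans (appending, as Python does)
def pvAScan : List Int → Int → Option Int → List (Int × Int) → List (Int × Int)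
  | [], _, _, acc => acc
  | t :: rest, i, opt, acc =>
    if t = 151652 then pvAScan rest (i + 1) (some i) acc
    else if t = 151653 then
      match opt with
      | some s => pvAScan rest (i + 1) none (acc ++ [(s, i)])
      | none => pvAScan rest (i + 1) opt acc
    else pvAScan rest (i + 1) opt acc

-- A's second loop over image_spans: state (cur, token_spans, text list, image list)
def pvAEmit : List (Int × Int) → Int → List (String × (Int × Int)) → List (Int × Int) → List (Int × Int) →
    Int × List (String × (Int × Int)) × List (Int × Int) × List (Int × Int)
  | [], cur, tok, txt, img => (cur, tok, txt, img)
  | (s, e) :: rest, cur, tok, txt, img =>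
    if cur < s then
      pvAEmit rest (e + 1) (tok ++ [("text", (cur, s - 1)), ("image", (s, e))]) (txt ++ [(cur, s - 1)]) (img ++ [(s, e)])
    else
      pvAEmit rest (e + 1) (tok ++ [("image", (s, e))]) txt (img ++ [(s, e)])

def get_qwen_image_text_spans_py (input_ids : List Int) (prompt_start : Int) : List Int × (List (String × (Int × Int))) × (List (String × List (Int × Int))) :=
  let trimmed := PySem.List.slice input_ids (some prompt_start) (some ((input_ids.length : Int) - 5))
  let image_spans := pvAScan trimmed 0 none []
  let st := pvAEmit image_spans 0 [] [] []
  let cur := st.1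
  let tok := st.2.1
  let txt := st.2.2.1
  let img := st.2.2.2
  let n : Int := trimmed.length
  if cur < n then
    (trimmed, tok ++ [("text", (cur, n - 1))], [("text", txt ++ [(cur, n - 1)]), ("image", img)])
  else
    (trimmed, tok, [("text", txt), ("image", img)])

-- ===== PORT B =====
-- B's position comprehension: [i for i, t in enumerate(trimmed) if t == target]
def pvPositions (target : Int) : List Int → Int → List Int
  | [], _ => []
  | t :: rest, i =>
    if t = target then i :: pvPositions target rest (i + 1) else pvPositions target rest (i + 1)

-- B's inner while loop: consume bos entries < e, remembering the last consumed one
def pvTake : List Int → Int → Option Int → Option Int × List Int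
  | [], _, last => (last, [])
  | b :: rest, e, last => if b < e then pvTake rest e (some b) else (last, b :: rest)

-- B's outer for loop over eos: two-pointer pairing (last BOS before each EOS wins)
def pvPairB : List Int → List Int → Option Int → List (Int × Int)
  | [], _, _ => []
  | e :: es, bos, last =>
    match pvTake bos e last with
    | (some b, r) => (b, e) :: pvPairB es r none
    | (none, r) => pvPairB es r none

def get_qwen_image_text_spans_py_alt (input_ids : List Int) (prompt_start : Int) : List Int × (List (String × (Int × Int))) × (List (String × List (Int × Int))) :=
  let trimmed := PySem.List.slice input_ids (some prompt_start) (some ((input_ids.length : Int) - 5))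
  let n : Int := trimmed.length
  let bos := pvPositions 151652 trimmed 0
  let eos := pvPositions 151653 trimmed 0
  let images := pvPairB eos bos none
  let starts : List Int := 0 :: images.map (fun p => p.2 + 1)
  let tailStart : Int := match images.getLast? with | some p => p.2 + 1 | none => 0
  let pieces := (List.zip starts images).flatMap
    (fun q => (if q.1 ≤ q.2.1 - 1 then [("text", (q.1, q.2.1 - 1))] else []) ++ [("image", q.2)])
  let token_spans := pieces ++ (if tailStart ≤ n - 1 then [("text", (tailStart, n - 1))] else [])
  (trimmed, token_spans,
    [("text", token_spans.filterMap (fun p => if p.1 = "text" then some p.2 else none)),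
     ("image", images)])

-- ===== PRECONDITION & SPEC =====
def Spec_get_qwen_image_text_spans_py (input_ids : List Int) (prompt_start : Int) (out : List Int × (List (String × (Int × Int))) × (List (String × List (Int × Int)))) : Prop := out = get_qwen_image_text_spans_py_alt input_ids prompt_start
instance (input_ids : List Int) (prompt_start : Int) (out : List Int × (List (String × (Int × Int))) × (List (String × List (Int × Int)))) : Decidable (Spec_get_qwen_image_text_spans_py input_ids prompt_start out) := by unfold Spec_get_qwen_image_text_spans_py; infer_instance

-- ===== CLAIM =====
def Claim_equal_get_qwen_image_text_spans_py : Prop := ∀ (input_ids : List Int) (prompt_start : Int), Dom_get_qwen_image_text_spans_py input_ids prompt_start → Spec_get_qwen_image_text_spans_py input_ids prompt_start (get_qwen_image_text_spans_py input_ids prompt_start)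

-- ===== LEMMAS AND PROOFS =====

-- every position produced is ≥ the running index
theorem pvPositions_ge (target : Int) (l : List Int) (i : Int) :
    ∀ x ∈ pvPositions target l i, i ≤ x := by
  induction l generalizing i with
  | nil => simp [pvPositions]
  | cons t rest ih =>
    intro x hx
    simp only [pvPositions] at hx
    split_ifs at hx with h
    · rcases List.mem_cons.1 hx with rfl | hx
      · omega
      · have := ih (i + 1) x hx; omega
    · have := ih (i + 1) x hx; omega

-- pvAScan's accumulator distributes: it only appends at the end.
theorem pvAScan_acc (rest : List Int) (i : Int) (opt : Option Int) (acc : List (Int × Int)) :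
    pvAScan rest i opt acc = acc ++ pvAScan rest i opt [] := by
  induction rest generalizing i opt acc with
  | nil => simp [pvAScan]
  | cons t rest ih =>
    simp only [pvAScan]
    split_ifs with h1 h2
    · exact ih ..
    · cases opt with
      | some s =>
        simp only
        rw [ih _ _ (acc ++ [(s, i)]), ih _ _ ([] ++ [(s, i)])]
        simp
      | none => exact ih ..
    · exact ih ..

-- A's scan over tokens equals B's two-pointer pairing of the position lists.
theorem pvAScan_eq_pvPairB (l : List Int) (i : Int) (opt : Option Int) :
    pvAScan l i opt [] = pvPairB (pvPositions 151653 l i) (pvPositions 151652 l i) opt := by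
  induction l generalizing i opt with
  | nil => simp [pvAScan, pvPositions, pvPairB]
  | cons t rest ih =>
    by_cases h1 : t = 151652
    · have h2 : ¬ t = 151653 := by omega
      simp only [pvAScan, pvPositions, if_pos h1, if_neg h2]
      rw [ih (i + 1) (some i)]
      cases heos : pvPositions 151653 rest (i + 1) with
      | nil => simp [pvPairB]
      | cons e es =>
        have he : i + 1 ≤ e := pvPositions_ge 151653 rest (i + 1) e (heos ▸ List.mem_cons_self ..)
        simp only [pvPairB, pvTake, if_pos (show i < e by omega)]
    · by_cases h2 : t = 151653
      · simp only [pvAScan, pvPositions, if_neg h1, if_pos h2]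
        have hbos := pvPositions_ge 151652 rest (i + 1)
        have htake : ∀ o : Option Int, pvTake (pvPositions 151652 rest (i + 1)) i o = (o, pvPositions 151652 rest (i + 1)) := by
          intro o
          cases hb : pvPositions 151652 rest (i + 1) with
          | nil => simp [pvTake]
          | cons b r =>
            have hble : i + 1 ≤ b := hbos b (hb ▸ List.mem_cons_self ..)
            have hnb : ¬ b < i := by omega
            simp [pvTake, hnb]
        cases opt with
        | some s =>
          simp only [pvPairB, htake]
          rw [pvAScan_acc, ih (i + 1) none]
          simp
        | none =>
          simp only [pvPairB, htake]
          exact ih ..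
      · simp only [pvAScan, pvPositions, if_neg h1, if_neg h2]
        exact ih ..

-- the per-image pieces, built head-to-tail with a running cursor (proof-side shape)
def pvP : List (Int × Int) → Int → List (String × (Int × Int))
  | [], _ => []
  | (b, e) :: rest, cur =>
    (if cur ≤ b - 1 then [("text", (cur, b - 1))] else []) ++ ("image", (b, e)) :: pvP rest (e + 1)

-- the cursor after processing all images
def pvCur : List (Int × Int) → Int → Int
  | [], cur => cur
  | (_, e) :: rest, _ => pvCur rest (e + 1)

theorem pvCur_eq_getLast (images : List (Int × Int)) (cur : Int) :
    pvCur images cur = match images.getLast? with | some p => p.2 + 1 | none => cur := by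
  induction images generalizing cur with
  | nil => simp [pvCur]
  | cons p rest ih =>
    cases p with
    | mk b e =>
      simp only [pvCur, ih]
      cases h : rest.getLast? with
      | some q => simp [List.getLast?_cons, h]
      | none => simp [List.getLast?_cons, h]

-- B's zip/flatMap build equals the cursor-driven pvP
theorem pvZip_eq_pvP (images : List (Int × Int)) (cur : Int) :
    (List.zip (cur :: images.map (fun p => p.2 + 1)) images).flatMap
      (fun q => (if q.1 ≤ q.2.1 - 1 then [("text", (q.1, q.2.1 - 1))] else []) ++ [("image", q.2)])
    = pvP images cur := by
  induction images generalizing cur with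
  | nil => simp [pvP]
  | cons p rest ih =>
    cases p with
    | mk b e =>
      simp only [List.map_cons, List.zip_cons_cons, List.flatMap_cons, pvP, ih (e + 1)]
      simp

-- A's emit loop computes (pvCur, tok ++ pvP, txt ++ text-filter of pvP, img ++ images)
theorem pvAEmit_eq (images : List (Int × Int)) (cur : Int) (tok : List (String × (Int × Int)))
    (txt img : List (Int × Int)) :
    pvAEmit images cur tok txt img =
      (pvCur images cur,
       tok ++ pvP images cur,
       txt ++ (pvP images cur).filterMap (fun p => if p.1 = "text" then some p.2 else none),
       img ++ images) := by
  induction images generalizing cur tok txt img with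
  | nil => simp [pvAEmit, pvP, pvCur]
  | cons p rest ih =>
    cases p with
    | mk b e =>
      simp only [pvAEmit, pvP, pvCur]
      split_ifs with h h' <;>
        first
        | (exfalso; omega)
        | (rw [ih]; simp)

-- ===== VERDICT =====
theorem get_qwen_image_text_spans_py_spec : Claim_equal_get_qwen_image_text_spans_py := by
  intro input_ids prompt_start _
  unfold Spec_get_qwen_image_text_spans_py
  unfold get_qwen_image_text_spans_py get_qwen_image_text_spans_py_alt
  simp only [pvAScan_eq_pvPairB, pvAEmit_eq, ← pvZip_eq_pvP, pvCur_eq_getLast]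
  set trimmed := PySem.List.slice input_ids (some prompt_start) (some ((input_ids.length : Int) - 5)) with htr
  set images := pvPairB (pvPositions 151653 trimmed 0) (pvPositions 151652 trimmed 0) none with him
  set n : Int := (trimmed.length : Int) with hn
  set tailStart : Int := (match images.getLast? with | some p => p.2 + 1 | none => 0) with hts
  by_cases hlt : tailStart < n
  · rw [if_pos hlt, if_pos (by omega : tailStart ≤ n - 1)]
    simp [List.filterMap_append]
  · rw [if_neg hlt, if_neg (by omega : ¬ tailStart ≤ n - 1)]
    simp
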